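-- pv_equiv track=rewrite | github.com/DewPeaceTigers/AlgorithmStudy | weeks/week_22/PG_17683/minji.py | solution
-- ===== SOURCE A (Python) =====
-- def change(music) :
--     if 'A#' in music :
--         music=music.replace('A#', 'a')
--     if 'C#' in music :
--         music=music.replace('C#', 'c')
--     if 'D#' in music :
--         music=music.replace('D#', 'd')
--     if 'F#' in music :
--         music=music.replace('F#', 'f')
--     if 'G#' in music:
--         music=music.replace('G#', 'g')
--     return music
--
-- def solution(m, musicinfos):
--     answer = ''
--     music_list=[]
--     m_len=len(m)
--     m=change(m)
--     index=0
--     for musicinfo in musicinfos :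
--         index+=1
--         info=musicinfo.split(',')
--         start=info[0].split(':')
--         end=info[1].split(':')
--         time=(int(end[0])-int(start[0]))*60+(int(end[1])-int(start[1])) #재생시간
--         music=change(info[3]) #소문자로 변경
--         music=music*(time//len(music))+music[:time%len(music)]
--         if m in music : #재생 시간, 순서, 노래 제목 저장
--             music_list.append([time, index, info[2]])
--     if not music_list:
--         answer='(None)'
--     elif len(music_list)==1 :
--         answer=music_list[0][2]
--     else:
--         music_list.sort(key=lambda x:(-x[0], x[1]))
--         answer=music_list[0][2]
--     return answer
-- ===== SOURCE B (Python) =====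
-- def change(music):
--     for sharp, flat in (('A#', 'a'), ('C#', 'c'), ('D#', 'd'), ('F#', 'f'), ('G#', 'g')):
--         music = music.replace(sharp, flat)
--     return music
--
-- def to_seconds(ts):
--     parts = ts.split(':')
--     return 60 * int(parts[0]) + int(parts[1])
--
-- def solution(m, musicinfos):
--     target = change(m)
--     best_time = None
--     best_title = '(None)'
--     for musicinfo in musicinfos:
--         parts = musicinfo.split(',')
--         duration = to_seconds(parts[1]) - to_seconds(parts[0])
--         sheet = change(parts[3])
--         q, r = divmod(duration, len(sheet))
--         if target in sheet * q + sheet[:r] and (best_time is None or duration > best_time):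
--             best_time = duration
--             best_title = parts[2]
--     return best_title
-- ===== Notes on version B (the rewrite author's own statement) =====
-- stated objective: simpler
-- what changed: B replaces A's collect-all-matches-into-a-list-then-sort-by-(-time,index) selection (plus its empty/singleton special cases) with a single streaming best-so-far pass (strict > so ties keep the first match), and computes the play time via a to_seconds helper instead of per-component subtraction.
import Mathlib
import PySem

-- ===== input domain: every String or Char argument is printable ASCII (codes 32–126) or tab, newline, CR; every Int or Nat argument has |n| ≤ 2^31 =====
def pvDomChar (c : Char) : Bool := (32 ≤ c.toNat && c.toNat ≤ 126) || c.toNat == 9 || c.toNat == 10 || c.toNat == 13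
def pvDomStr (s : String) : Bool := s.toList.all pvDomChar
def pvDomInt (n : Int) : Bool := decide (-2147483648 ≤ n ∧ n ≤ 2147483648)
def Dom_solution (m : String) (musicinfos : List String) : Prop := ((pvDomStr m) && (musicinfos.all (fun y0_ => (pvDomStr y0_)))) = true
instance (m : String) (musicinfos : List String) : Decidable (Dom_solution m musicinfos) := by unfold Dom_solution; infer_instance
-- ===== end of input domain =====

-- B replaces A's collect-matches-then-sort selection with a single streaming best-so-far pass (objective: simpler).

-- ===== PORT A =====
def change (music : String) : String :=
  let music := if PySem.Str.isIn "A#" music then PySem.Str.replace music "A#" "a" else music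
  let music := if PySem.Str.isIn "C#" music then PySem.Str.replace music "C#" "c" else music
  let music := if PySem.Str.isIn "D#" music then PySem.Str.replace music "D#" "d" else music
  let music := if PySem.Str.isIn "F#" music then PySem.Str.replace music "F#" "f" else music
  let music := if PySem.Str.isIn "G#" music then PySem.Str.replace music "G#" "g" else music
  music

-- one iteration of A's for-loop; state = (index, music_list); none = the Python raised
def solutionStep (m' : String) (st : Option (Int × List (Int × Int × String))) (musicinfo : String) :
    Option (Int × List (Int × Int × String)) :=
  match st with
  | none => none
  | some (index, musicList) =>
    let index := index + 1
    let info := (PySem.Str.split? musicinfo ",").getD []   -- sep "," ≠ "", so split? is some: exact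
    match PySem.List.pyGet? info 0, PySem.List.pyGet? info 1, PySem.List.pyGet? info 3 with
    | some i0, some i1, some i3 =>
      let start := (PySem.Str.split? i0 ":").getD []       -- sep ":" ≠ ""
      let stop := (PySem.Str.split? i1 ":").getD []
      match PySem.List.pyGet? stop 0, PySem.List.pyGet? start 0,
            PySem.List.pyGet? stop 1, PySem.List.pyGet? start 1 with
      | some e0, some s0, some e1, some s1 =>
        match PySem.Int.ofStr? e0, PySem.Int.ofStr? s0, PySem.Int.ofStr? e1, PySem.Int.ofStr? s1 with
        | some ne0, some ns0, some ne1, some ns1 =>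
          let time := (ne0 - ns0) * 60 + (ne1 - ns1)
          let music := change i3
          match PySem.Int.floordiv? time (PySem.Str.len music), PySem.Int.mod? time (PySem.Str.len music) with
          | some q, some r =>
            let music2 := PySem.List.pyRepeat music.toList q ++ PySem.Chars.slice music.toList none (some r)
            if PySem.Chars.isIn m'.toList music2 then
              match PySem.List.pyGet? info 2 with
              | some i2 => some (index, musicList ++ [(time, index, i2)])
              | none => none
            else some (index, musicList)
          | _, _ => none
        | _, _, _, _ => none
      | _, _, _, _ => none
    | _, _, _ => none

def solution (m : String) (musicinfos : List String) : String :=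
  -- A's `m_len = len(m)` is never used and is dropped
  let m' := change m
  match musicinfos.foldl (solutionStep m') (some (0, [])) with
  | none => ""   -- the Python raised here; excluded by Pre_solution
  | some (_, musicList) =>
    match musicList with
    | [] => "(None)"
    | [x] => x.2.2
    | _ =>
      match PySem.List.sorted2 musicList (fun x => -x.1) (fun x => x.2.1) with
      | [] => ""   -- unreachable: sorted2 of a nonempty list is nonempty
      | y :: _ => y.2.2

-- ===== PORT B =====
def changeAlt (music : String) : String :=
  [("A#", "a"), ("C#", "c"), ("D#", "d"), ("F#", "f"), ("G#", "g")].foldl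
    (fun mu p => PySem.Str.replace mu p.1 p.2) music

def toSeconds? (ts : String) : Option Int :=
  let parts := (PySem.Str.split? ts ":").getD []   -- sep ":" ≠ ""
  match PySem.List.pyGet? parts 0, PySem.List.pyGet? parts 1 with
  | some a, some b =>
    match PySem.Int.ofStr? a, PySem.Int.ofStr? b with
    | some x, some y => some (60 * x + y)
    | _, _ => none
  | _, _ => none

-- one iteration of B's loop; state = (best_time, best_title); none = the Python raised
def solutionAltStep (target : String) (st : Option (Option Int × String)) (musicinfo : String) :
    Option (Option Int × String) :=
  match st with
  | none => none
  | some (bestTime, bestTitle) =>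
    let parts := (PySem.Str.split? musicinfo ",").getD []   -- sep "," ≠ ""
    match PySem.List.pyGet? parts 0, PySem.List.pyGet? parts 1, PySem.List.pyGet? parts 3 with
    | some p0, some p1, some p3 =>
      match toSeconds? p1, toSeconds? p0 with
      | some e, some s =>
        let duration := e - s
        let sheet := changeAlt p3
        match PySem.Int.divmod? duration (PySem.Str.len sheet) with
        | some (q, r) =>
          let expanded := PySem.List.pyRepeat sheet.toList q ++ PySem.Chars.slice sheet.toList none (some r)
          if PySem.Chars.isIn target.toList expanded &&
              (match bestTime with | none => true | some t => decide (t < duration)) then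
            match PySem.List.pyGet? parts 2 with
            | some p2 => some (some duration, p2)
            | none => none
          else some (bestTime, bestTitle)
        | none => none
      | _, _ => none
    | _, _, _ => none

def solution_alt (m : String) (musicinfos : List String) : String :=
  let target := changeAlt m
  match musicinfos.foldl (solutionAltStep target) (some (none, "(None)")) with
  | none => ""
  | some (_, bestTitle) => bestTitle

-- ===== PRECONDITION & SPEC =====
-- "HH:MM" piece parses: split(':') has ≥ 2 fields and fields 0,1 are int()-parsable
def preTime (ts : String) : Bool :=
  let p := (PySem.Str.split? ts ":").getD []
  decide (2 ≤ p.length) && (PySem.Int.ofStr? (p.getD 0 "")).isSome && (PySem.Int.ofStr? (p.getD 1 "")).isSome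

def preInfo (mi : String) : Bool :=
  let info := (PySem.Str.split? mi ",").getD []
  decide (4 ≤ info.length) && preTime (info.getD 0 "") && preTime (info.getD 1 "") && !(info.getD 3 "" == "")

-- Pre_ excludes exactly the inputs where the Python A raises: a musicinfo entry with fewer than
-- 4 comma fields (IndexError), a time field without ':' or with a non-integer part (IndexError/
-- ValueError), or an empty melody sheet (ZeroDivisionError). A returns on every other input.
def Pre_solution (m : String) (musicinfos : List String) : Prop :=
  ∀ mi ∈ musicinfos, preInfo mi = true
instance (m : String) (musicinfos : List String) : Decidable (Pre_solution m musicinfos) := by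
  unfold Pre_solution; infer_instance

def pvWitness_solution : String × List String := ("ABC", ["03:00,03:30,HELLO,ABC", "03:00,03:20,WORLD,ABCDEF"])

def Spec_solution (m : String) (musicinfos : List String) (out : String) : Prop := out = solution_alt m musicinfos
instance (m : String) (musicinfos : List String) (out : String) : Decidable (Spec_solution m musicinfos out) := by unfold Spec_solution; infer_instance

-- ===== CLAIM (what is proved, stated in full; the proofs are below) =====
def Claim_equal_solution : Prop := ∀ (m : String) (musicinfos : List String), Dom_solution m musicinfos → Pre_solution m musicinfos → Spec_solution m musicinfos (solution m musicinfos)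

-- ===== LEMMAS AND PROOFS =====

-- `s.replace(old, new)` with old not a substring is the identity
lemma replace_go_of_not_infix (old new : List Char) :
    ∀ (fuel : Nat) (l acc : List Char), ¬ old <:+: l →
      PySem.Chars.replace.go old new fuel l acc = acc.reverse ++ l := by
  intro fuel
  induction fuel with
  | zero => intro l acc _; simp [PySem.Chars.replace.go]
  | succ n ih =>
    intro l acc h
    cases l with
    | nil => simp [PySem.Chars.replace.go]
    | cons c t =>
      have hpre : old.isPrefixOf (c :: t) = false := by
        rw [Bool.eq_false_iff]
        intro hp
        exact h (List.isPrefixOf_iff_prefix.mp hp).isInfix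
      have ht : ¬ old <:+: t := fun hi => h (hi.trans (List.suffix_cons c t).isInfix)
      simp [PySem.Chars.replace.go, hpre, ih t (c :: acc) ht]

lemma replace_not_in (s old new : String) (hold : old.toList ≠ [])
    (h : PySem.Str.isIn old s = false) : PySem.Str.replace s old new = s := by
  have hinf : ¬ old.toList <:+: s.toList := by
    rw [← PySem.Chars.isIn_eq_false_iff]
    simpa using h
  rw [← String.toList_inj, PySem.Str.toList_replace, PySem.Chars.replace]
  simp only [List.isEmpty_iff, if_neg hold]
  simpa using replace_go_of_not_infix old.toList new.toList s.toList.length s.toList [] hinf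

lemma change_guard_eq (s p r : String) (hp : p.toList ≠ []) :
    (if PySem.Str.isIn p s then PySem.Str.replace s p r else s) = PySem.Str.replace s p r := by
  cases h : PySem.Str.isIn p s
  · rw [if_neg (by simp), replace_not_in s p r hp h]
  · rw [if_pos (by simp)]

lemma change_eq (s : String) : change s = changeAlt s := by
  rw [change, changeAlt]
  simp only [List.foldl]
  rw [change_guard_eq _ "A#" _ (by decide), change_guard_eq _ "C#" _ (by decide),
      change_guard_eq _ "D#" _ (by decide), change_guard_eq _ "F#" _ (by decide),
      change_guard_eq _ "G#" _ (by decide)]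

-- replace with a nonempty replacement never empties a nonempty string
lemma replace_go_ne_nil (old new : List Char) (hnew : new ≠ []) :
    ∀ (fuel : Nat) (l acc : List Char), acc ≠ [] ∨ l ≠ [] →
      PySem.Chars.replace.go old new fuel l acc ≠ [] := by
  intro fuel
  induction fuel with
  | zero => intro l acc h; simp [PySem.Chars.replace.go]; rcases h with h | h <;> simp [h]
  | succ n ih =>
    intro l acc h
    cases l with
    | nil =>
      simp [PySem.Chars.replace.go]
      rcases h with h | h
      · simpa using h
      · exact absurd rfl h
    | cons c t =>
      by_cases hpre : old.isPrefixOf (c :: t)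
      · simp [PySem.Chars.replace.go, hpre]
        exact ih _ _ (Or.inl (by simp [hnew]))
      · simp [PySem.Chars.replace.go, hpre]
        exact ih _ _ (Or.inl (by simp))

lemma replace_ne_empty (s old new : String) (hs : s ≠ "") (hnew : new.toList ≠ []) :
    PySem.Str.replace s old new ≠ "" := by
  have hsl : s.toList ≠ [] := fun hl => hs (String.toList_inj.mp (by simpa using hl))
  intro he
  have : (PySem.Str.replace s old new).toList = [] := by simp [he]
  rw [PySem.Str.toList_replace, PySem.Chars.replace] at this
  by_cases hold : old.toList.isEmpty
  · rw [if_pos hold] at this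
    exact hnew (by simpa using (List.append_eq_nil_iff.mp this).1)
  · rw [if_neg hold] at this
    exact replace_go_ne_nil old.toList new.toList hnew _ s.toList [] (Or.inr hsl) this

lemma changeAlt_ne_empty (s : String) (hs : s ≠ "") : changeAlt s ≠ "" := by
  rw [changeAlt]
  simp only [List.foldl]
  apply replace_ne_empty _ _ _ _ (by decide)
  apply replace_ne_empty _ _ _ _ (by decide)
  apply replace_ne_empty _ _ _ _ (by decide)
  apply replace_ne_empty _ _ _ _ (by decide)
  exact replace_ne_empty _ _ _ hs (by decide)

-- pyGet? at a small in-range numeral index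
lemma pyGet?_getD {α : Type} [Inhabited α] (l : List α) (i : Int) (n : Nat) (d : α)
    (hi : i = (n : Int)) (h : n < l.length) :
    PySem.List.pyGet? l i = some (l.getD n d) := by
  rw [hi, PySem.List.pyGet?_natCast, List.getElem?_eq_getElem h, List.getD_eq_getElem l d h]

-- streaming best-so-far step, as a pure function on one matched entry (time, index, title)
def bstep (b : Option Int × String) (x : Int × Int × String) : Option Int × String :=
  if (match b.1 with | none => true | some t => decide (t < x.1)) then (some x.1, x.2.2) else b

-- running argmax (strict >, first wins) over matched entries
def pick (b x : Int × Int × String) : Int × Int × String := if b.1 < x.1 then x else b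

-- the tuple-key comparison Python's sort(key=lambda x:(-x[0], x[1])) uses
def before2 (a b : Int × Int × String) : Bool :=
  decide (-a.1 < -b.1) || (!decide (-b.1 < -a.1) && decide (a.2.1 < b.2.1))

-- what one insertBy-insertion does to the head of the accumulator
def hstep {α : Type} (before : α → α → Bool) (h : Option α) (x : α) : Option α :=
  some (match h with | none => x | some y => if before x y then x else y)

-- head of an insertBy-insertion depends only on the head of the accumulator
lemma head?_insertBy {α : Type} (before : α → α → Bool) (x : α) (acc : List α) :
    (PySem.List.insertBy before x acc).head? = hstep before acc.head? x := by
  cases acc with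
  | nil => simp [PySem.List.insertBy, hstep]
  | cons y ys => by_cases h : before x y <;> simp [PySem.List.insertBy, hstep, h]

lemma head?_foldl_insertBy {α : Type} (before : α → α → Bool) :
    ∀ (l acc : List α),
      (l.foldl (fun a x => PySem.List.insertBy before x a) acc).head? =
        l.foldl (hstep before) acc.head? := by
  intro l
  induction l with
  | nil => intro acc; simp
  | cons x t ih =>
    intro acc
    simp only [List.foldl_cons]
    rw [ih, head?_insertBy]

-- on entries whose indices keep growing, the tuple-key comparison is the strict time comparison
lemma gfold_eq_pick :
    ∀ (l : List (Int × Int × String)) (b : Int × Int × String),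
      (∀ x ∈ l, b.2.1 < x.2.1) → l.Pairwise (fun a c => a.2.1 < c.2.1) →
      l.foldl (hstep before2) (some b) = some (l.foldl pick b) := by
  intro l
  induction l with
  | nil => intro b _ _; simp
  | cons x t ih =>
    intro b hb hp
    have hbx : b.2.1 < x.2.1 := hb x (by simp)
    have hbefore : before2 x b = decide (b.1 < x.1) := by
      rw [before2]
      have h1 : decide (-x.1 < -b.1) = decide (b.1 < x.1) := by simp
      have h2 : decide (x.2.1 < b.2.1) = false := by simp; omega
      rw [h1, h2]
      simp
    simp only [List.foldl_cons]
    have hx : hstep before2 (some b) x = some (pick b x) := by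
      simp only [hstep, hbefore, pick]
      by_cases h : b.1 < x.1 <;> simp [h]
    rw [hx]
    rcases List.pairwise_cons.mp hp with ⟨hxall, hpt⟩
    apply ih
    · intro y hy
      rw [pick]
      by_cases h : b.1 < x.1
      · simpa [h] using hxall y hy
      · simp only [if_neg h]
        exact lt_trans hbx (hxall y hy)
    · exact hpt

-- projecting the streaming state out of the running argmax
lemma bstep_proj :
    ∀ (l : List (Int × Int × String)) (b : Int × Int × String),
      l.foldl bstep (some b.1, b.2.2) = (some (l.foldl pick b).1, (l.foldl pick b).2.2) := by
  intro l
  induction l with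
  | nil => intro b; simp
  | cons x t ih =>
    intro b
    simp only [List.foldl_cons]
    have : bstep (some b.1, b.2.2) x = (some (pick b x).1, (pick b x).2.2) := by
      rw [bstep, pick]
      by_cases h : b.1 < x.1 <;> simp [h]
    rw [this, ih]

lemma len_ne_zero (s : String) (hs : s ≠ "") : PySem.Str.len s ≠ 0 := by
  simp [PySem.Str.len]
  exact hs

-- both loop bodies agree on one parsed entry
lemma step_pair (m' mi : String) (hmi : preInfo mi = true) (idx : Int)
    (ml : List (Int × Int × String)) (bt : Option Int × String) :
    ∃ (time : Int) (title : String) (mat : Bool),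
      solutionStep m' (some (idx, ml)) mi =
        some (idx + 1, if mat then ml ++ [(time, idx + 1, title)] else ml) ∧
      solutionAltStep m' (some bt) mi = some (if mat then bstep bt (time, idx + 1, title) else bt) := by
  rw [preInfo] at hmi
  simp only [Bool.and_eq_true, decide_eq_true_eq, Bool.not_eq_true', beq_eq_false_iff_ne] at hmi
  obtain ⟨⟨⟨hlen, ht0⟩, ht1⟩, h3⟩ := hmi
  set info := (PySem.Str.split? mi ",").getD [] with hinfo
  have g0 := pyGet?_getD info 0 0 "" (by norm_num) (by omega)
  have g1 := pyGet?_getD info 1 1 "" (by norm_num) (by omega)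
  have g2 := pyGet?_getD info 2 2 "" (by norm_num) (by omega)
  have g3 := pyGet?_getD info 3 3 "" (by norm_num) (by omega)
  rw [preTime] at ht0 ht1
  simp only [Bool.and_eq_true, decide_eq_true_eq, Option.isSome_iff_exists] at ht0 ht1
  obtain ⟨⟨hl0, a0, ha0⟩, b0, hb0⟩ := ht0
  obtain ⟨⟨hl1, a1, ha1⟩, b1, hb1⟩ := ht1
  set sp0 := (PySem.Str.split? (info.getD 0 "") ":").getD [] with hsp0
  set sp1 := (PySem.Str.split? (info.getD 1 "") ":").getD [] with hsp1
  have p00 := pyGet?_getD sp0 0 0 "" (by norm_num) (by omega)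
  have p01 := pyGet?_getD sp0 1 1 "" (by norm_num) (by omega)
  have p10 := pyGet?_getD sp1 0 0 "" (by norm_num) (by omega)
  have p11 := pyGet?_getD sp1 1 1 "" (by norm_num) (by omega)
  set sheet := changeAlt (info.getD 3 "") with hsheet
  have hLne : PySem.Str.len sheet ≠ 0 := len_ne_zero _ (changeAlt_ne_empty _ h3)
  set L := PySem.Str.len sheet with hL
  set timeB := (60 * a1 + b1) - (60 * a0 + b0) with htB
  have htime : (a1 - a0) * 60 + (b1 - b0) = timeB := by rw [htB]; ring
  have hfd : PySem.Int.floordiv? timeB L = some (PySem.Int.floordiv timeB L) := by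
    simp [PySem.Int.floordiv?, PySem.Int.floordiv, hLne]
  have hmd : PySem.Int.mod? timeB L = some (PySem.Int.mod timeB L) := by
    simp [PySem.Int.mod?, PySem.Int.mod, hLne]
  have hdm : PySem.Int.divmod? timeB L = some (PySem.Int.floordiv timeB L, PySem.Int.mod timeB L) := by
    simp [PySem.Int.divmod?, PySem.Int.floordiv, PySem.Int.mod, hLne]
  set mat := PySem.Chars.isIn m'.toList
      (PySem.List.pyRepeat sheet.toList (PySem.Int.floordiv timeB L) ++
        PySem.Chars.slice sheet.toList none (some (PySem.Int.mod timeB L))) with hmatdef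
  refine ⟨timeB, info.getD 2 "", mat, ?_, ?_⟩
  · simp only [solutionStep]
    simp only [← hinfo, g0, g1, g2, g3, ← hsp0, ← hsp1, p00, p01, p10, p11, ha0, hb0, ha1, hb1,
      change_eq, ← hsheet, ← hL, htime, hfd, hmd, ← hmatdef]
    cases hm : mat <;> simp
  · simp only [solutionAltStep, toSeconds?]
    simp only [← hinfo, g0, g1, g2, g3, ← hsp0, ← hsp1, p00, p01, p10, p11, ha0, hb0, ha1, hb1,
      ← hsheet, ← hL, ← htB, hdm, ← hmatdef]
    cases hm : mat
    · simp
    · simp only [Bool.true_and, bstep]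
      cases hc : (match bt.1 with | none => true | some t => decide (t < timeB)) <;> simp

-- the two loops, run in lockstep: A's music_list and B's best-so-far stay related
lemma loop_eq (m' : String) :
    ∀ (mis : List String), (∀ mi ∈ mis, preInfo mi = true) →
    ∀ (idx : Int) (ml : List (Int × Int × String)),
      (∀ y ∈ ml, y.2.1 ≤ idx) → ml.Pairwise (fun a c => a.2.1 < c.2.1) →
      ∃ idx' ml',
        mis.foldl (solutionStep m') (some (idx, ml)) = some (idx', ml') ∧
        (∀ y ∈ ml', y.2.1 ≤ idx') ∧ ml'.Pairwise (fun a c => a.2.1 < c.2.1) ∧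
        mis.foldl (solutionAltStep m') (some (ml.foldl bstep (none, "(None)"))) =
          some (ml'.foldl bstep (none, "(None)")) := by
  intro mis
  induction mis with
  | nil =>
    intro _ idx ml hle hp
    exact ⟨idx, ml, by simp, hle, hp, by simp⟩
  | cons mi t ih =>
    intro hpre idx ml hle hp
    obtain ⟨time, title, mat, hA, hB⟩ :=
      step_pair m' mi (hpre mi (by simp)) idx ml (ml.foldl bstep (none, "(None)"))
    have hpret : ∀ x ∈ t, preInfo x = true := fun x hx => hpre x (by simp [hx])
    cases mat with
    | false =>
      simp only [Bool.false_eq_true, if_false] at hA hB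
      obtain ⟨idx', ml', h1, h2, h3, h4⟩ := ih hpret (idx + 1) ml
        (fun y hy => le_trans (hle y hy) (by omega)) hp
      exact ⟨idx', ml', by rw [List.foldl_cons, hA]; exact h1, h2, h3,
        by rw [List.foldl_cons, hB]; exact h4⟩
    | true =>
      simp only [if_true] at hA hB
      have hle' : ∀ y ∈ ml ++ [(time, idx + 1, title)], y.2.1 ≤ idx + 1 := by
        intro y hy
        rcases List.mem_append.mp hy with h | h
        · exact le_trans (hle y h) (by omega)
        · simp at h; simp [h]
      have hp' : (ml ++ [(time, idx + 1, title)]).Pairwise (fun a c => a.2.1 < c.2.1) := by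
        rw [List.pairwise_append]
        refine ⟨hp, by simp, ?_⟩
        intro a ha b hb
        simp at hb
        have := hle a ha
        simp [hb]; omega
      obtain ⟨idx', ml', h1, h2, h3, h4⟩ := ih hpret (idx + 1) (ml ++ [(time, idx + 1, title)]) hle' hp'
      refine ⟨idx', ml', by rw [List.foldl_cons, hA]; exact h1, h2, h3, ?_⟩
      have hfa : List.foldl bstep (none, "(None)") (ml ++ [(time, idx + 1, title)]) =
          bstep (List.foldl bstep (none, "(None)") ml) (time, idx + 1, title) := by
        simp [List.foldl_append]
      rw [List.foldl_cons, hB, ← hfa]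
      exact h4

-- head of Python's sort(key=lambda x:(-x[0], x[1])) on an index-increasing list is the
-- streaming argmax (strict >, earliest wins)
lemma sorted2_head (x : Int × Int × String) (rest : List (Int × Int × String))
    (hp : (x :: rest).Pairwise (fun a c => a.2.1 < c.2.1)) :
    (PySem.List.sorted2 (x :: rest) (fun y => -y.1) (fun y => y.2.1) false).head? =
      some (rest.foldl pick x) := by
  have hdef : PySem.List.sorted2 (x :: rest) (fun y => -y.1) (fun y => y.2.1) false =
      (x :: rest).foldl (fun acc y => PySem.List.insertBy before2 y acc) [] := rfl
  rw [hdef, head?_foldl_insertBy]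
  simp only [List.foldl_cons, List.head?_nil]
  rcases List.pairwise_cons.mp hp with ⟨hxall, hpt⟩
  exact gfold_eq_pick rest x hxall hpt

-- ===== VERDICT (by name: the statement is the Claim_ definition above) =====
theorem solution_spec : Claim_equal_solution := by
  intro m musicinfos _ hpre
  rw [Spec_solution, solution, solution_alt, change_eq]
  obtain ⟨idx', ml', h1, _, h3, h4⟩ := loop_eq (changeAlt m) musicinfos hpre 0 []
    (by simp) (by simp)
  rw [h1]
  simp only [List.foldl_nil] at h4
  rw [h4]
  match ml', h3 with
  | [], _ => simp
  | [x], _ => simp [bstep]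
  | x :: y :: t, h3 =>
    have hhead := sorted2_head x (y :: t) h3
    have hfold : List.foldl bstep (none, "(None)") (x :: y :: t) =
        List.foldl bstep (some x.1, x.2.2) (y :: t) := by
      rw [List.foldl_cons]
      rfl
    rw [hfold, bstep_proj (y :: t) x]
    dsimp only
    match hs : PySem.List.sorted2 (x :: y :: t) (fun y => -y.1) (fun y => y.2.1) false, hhead with
    | z :: _, hhead =>
      simp only [List.head?_cons, Option.some_inj] at hhead
      dsimp only
      rw [hhead]
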